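-- pv_equiv track=rewrite | github.com/HamletJr/tbi-search-engine-from-scratch | compression.py | _find_optimal_b
-- ===== SOURCE A (Python) =====
-- def _find_optimal_b(block, W=32):
--     """Mencari nilai b optimal untuk block ini dengan mencoba semua kemungkinan b dari 0 sampai W,
--     dan menghitung cost untuk setiap b. Cost dihitung sebagai jumlah bit yang dibutuhkan untuk
--     menyimpan semua elemen dalam block dengan b bits per element, ditambah overhead untuk exceptions"""
--     best_b, best_cost = 0, float('inf')
--     for b in range(W + 1):
--         threshold = (1 << b) - 1 if b < W else 0xFFFFFFFF   # nilai maksimum untuk b bits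
--         e = sum(1 for v in block if v > threshold)  # jumlah exceptions untuk b ini
--         cost = len(block) * b + 128 + e * W  # cost = jumlah non-exception * b bit + jumlah exception * 32 bit untuk menyimpannya
--         if cost < best_cost:
--             best_cost, best_b = cost, b
--     return best_b
-- ===== SOURCE B (Python) =====
-- def _find_optimal_b(block, W=32):
--     # One pass builds a bit-length counter; exception counts then follow by
--     # running subtraction per b instead of rescanning the block for every b.
--     hist = {}
--     cnt_pos = 0
--     cnt32 = 0
--     for v in block:
--         if v > 0:
--             L = v.bit_length()
--             hist[L] = hist.get(L, 0) + 1
--             cnt_pos += 1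
--             if L > 32:
--                 cnt32 += 1
--     n = len(block)
--     best_b, best_cost = 0, None
--     e = cnt_pos
--     for b in range(W + 1):
--         if b < W:
--             e -= hist.get(b, 0)
--             cur = e
--         else:
--             cur = cnt32
--         cost = n * b + 128 + cur * W
--         if best_cost is None or cost < best_cost:
--             best_cost, best_b = cost, b
--     return best_b
-- ===== Notes on version B (the rewrite author's own statement) =====
-- stated objective: faster
-- what changed: B builds a bit-length histogram of the block in one pass and derives each b's exception count by a running subtraction (plus one precomputed count for the b=W threshold), instead of rescanning the whole block for every candidate b.
import Mathlib
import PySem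

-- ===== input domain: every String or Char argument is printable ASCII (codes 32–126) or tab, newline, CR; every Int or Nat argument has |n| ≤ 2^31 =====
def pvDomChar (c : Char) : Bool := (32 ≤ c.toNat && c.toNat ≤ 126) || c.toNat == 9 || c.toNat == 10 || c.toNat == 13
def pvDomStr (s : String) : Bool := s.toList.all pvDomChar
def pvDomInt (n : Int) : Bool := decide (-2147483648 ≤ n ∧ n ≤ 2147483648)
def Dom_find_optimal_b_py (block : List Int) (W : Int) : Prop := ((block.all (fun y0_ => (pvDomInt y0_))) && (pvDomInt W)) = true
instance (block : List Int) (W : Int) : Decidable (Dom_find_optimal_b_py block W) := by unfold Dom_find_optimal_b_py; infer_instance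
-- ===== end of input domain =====

-- B replaces A's per-b rescan of the block by one bit-length histogram pass plus a
-- running subtraction over b: the re-implementation is asymptotically faster (O(n+W) vs O(n*W)).

-- ===== PORT A =====
-- One iteration of A's `for b in range(W+1)` loop; state = (best_b, best_cost).
-- float('inf') initial best_cost is modeled as `none` (every int cost is below it);
-- `1 << b` with b ≥ 0 (b comes from range(W+1)) is exactly 2 ^ b.toNat.
def pvStepA (block : List Int) (W : Int) (st : Int × Option Int) (b : Int) : Int × Option Int :=
  let threshold : Int := if b < W then 2 ^ b.toNat - 1 else 0xFFFFFFFF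
  let e : Int := ((block.filter (fun v => threshold < v)).length : Int)
  let cost : Int := (block.length : Int) * b + 128 + e * W
  match st.2 with
  | none => (b, some cost)
  | some bc => if cost < bc then (b, some cost) else st

def find_optimal_b_py (block : List Int) (W : Int) : Int :=
  ((PySem.List.pyRange 0 (W + 1) 1).foldl (pvStepA block W) (0, none)).1

-- ===== PORT B =====
-- First pass of Source B: state = (hist, cnt_pos, cnt32); v.bit_length() (v > 0 here) is PySem.Int.bitLength.
def pvStepB1 (st : PySem.Dict Int Int × Int × Int) (v : Int) : PySem.Dict Int Int × Int × Int :=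
  if 0 < v then
    let L : Int := (PySem.Int.bitLength v : Int)
    (st.1.insert L (st.1.getD L 0 + 1), st.2.1 + 1, if 32 < L then st.2.2 + 1 else st.2.2)
  else st

-- One iteration of Source B's `for b in range(W+1)` loop; state = (best_b, best_cost, e); None = `none`.
def pvStepB2 (n W : Int) (hist : PySem.Dict Int Int) (cnt32 : Int)
    (st : Int × Option Int × Int) (b : Int) : Int × Option Int × Int :=
  let e' : Int := if b < W then st.2.2 - hist.getD b 0 else st.2.2
  let cur : Int := if b < W then e' else cnt32
  let cost : Int := n * b + 128 + cur * W
  match st.2.1 with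
  | none => (b, some cost, e')
  | some bc => if cost < bc then (b, some cost, e') else (st.1, some bc, e')

def find_optimal_b_py_alt (block : List Int) (W : Int) : Int :=
  let acc := block.foldl pvStepB1 (PySem.Dict.empty, 0, 0)
  ((PySem.List.pyRange 0 (W + 1) 1).foldl
      (pvStepB2 (block.length : Int) W acc.1 acc.2.2) (0, none, acc.2.1)).1

-- ===== PRECONDITION & SPEC =====
def Spec_find_optimal_b_py (block : List Int) (W : Int) (out : Int) : Prop := out = find_optimal_b_py_alt block W
instance (block : List Int) (W : Int) (out : Int) : Decidable (Spec_find_optimal_b_py block W out) := by unfold Spec_find_optimal_b_py; infer_instance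

-- ===== CLAIM (what is proved, stated in full; the proofs are below) =====
def Claim_equal_find_optimal_b_py : Prop := ∀ (block : List Int) (W : Int), Dom_find_optimal_b_py block W → Spec_find_optimal_b_py block W (find_optimal_b_py block W)

-- ===== LEMMAS AND PROOFS =====

-- number of v in block with v > 0 and bit_length(v) ≥ a
def pvCnt (block : List Int) (a : Int) : Int :=
  ((block.countP (fun v => decide (0 < v) && decide (a ≤ (PySem.Int.bitLength v : Int)))) : Int)

-- characterize the first pass of B
theorem pvStepB1_foldl (l : List Int) (d : PySem.Dict Int Int) (p c : Int) :
    l.foldl pvStepB1 (d, p, c) =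
      ( ((l.filter (fun v => decide (0 < v))).map (fun v => (PySem.Int.bitLength v : Int))).foldl
          (fun d x => d.insert x (d.getD x 0 + 1)) d,
        p + ((l.countP (fun v => decide (0 < v))) : Int),
        c + ((l.countP (fun v => decide (0 < v) && decide (32 < (PySem.Int.bitLength v : Int)))) : Int) ) := by
  induction l generalizing d p c with
  | nil => simp
  | cons v t ih =>
    by_cases hv : 0 < v
    · by_cases h32 : 32 < PySem.Int.bitLength v <;>
        · simp [pvStepB1, hv, h32, ih]
          omega
    · simp [pvStepB1, hv, ih]

theorem pvHist_getD (block : List Int) (b : Int) :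
    ((block.foldl pvStepB1 (PySem.Dict.empty, 0, 0)).1).getD b 0 =
      ((block.countP (fun v => decide (0 < v) && decide ((PySem.Int.bitLength v : Int) = b))) : Int) := by
  rw [pvStepB1_foldl, PySem.Dict.foldl_insert_getD_add_one_eq_counter, PySem.Dict.getD_counter]
  simp only [List.count, List.countP_map, List.countP_filter, Function.comp]
  have h := List.countP_congr (l := block)
    (p := fun v => ((PySem.Int.bitLength v : Int) == b) && decide (0 < v))
    (q := fun v => decide (0 < v) && decide ((PySem.Int.bitLength v : Int) = b))
    (fun v _ => by
      simp only [Bool.and_eq_true, beq_iff_eq, decide_eq_true_eq]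
      tauto)
  rw [h]

-- v > 2^k - 1  ↔  v > 0 and bit_length(v) > k
theorem pvThreshold_iff (k : Nat) (v : Int) :
    ((2:Int) ^ k - 1 < v) ↔ (0 < v ∧ (k : Int) < (PySem.Int.bitLength v : Int)) := by
  have hpow : (0:Int) < 2 ^ k := by positivity
  have hcast : ((2:Nat) ^ k : Int) = (2:Int) ^ k := by push_cast; ring
  constructor
  · intro h
    have hv : 0 < v := by omega
    refine ⟨hv, ?_⟩
    have h1 : (2:Nat) ^ k ≤ v.natAbs := by omega
    have h2 := PySem.Int.lt_two_pow_bitLength v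
    have h3 : (2:Nat) ^ k < 2 ^ PySem.Int.bitLength v := lt_of_le_of_lt h1 h2
    have h4 := (pow_lt_pow_iff_right₀ (by norm_num : (1:Nat) < 2)).mp h3
    exact_mod_cast h4
  · rintro ⟨hv, hk⟩
    have hne : v ≠ 0 := by omega
    have h2 := PySem.Int.two_pow_bitLength_le v hne
    have hk' : k ≤ PySem.Int.bitLength v - 1 := by omega
    have h5 : (2:Nat) ^ k ≤ 2 ^ (PySem.Int.bitLength v - 1) :=
      Nat.pow_le_pow_right (by norm_num) hk'
    have h3 : (2:Nat) ^ k ≤ v.natAbs := le_trans h5 h2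
    omega

-- splitting the "bit_length ≥ a" count at bit_length = a
theorem pvCnt_split (block : List Int) (a : Int) :
    pvCnt block a =
      ((block.countP (fun v => decide (0 < v) && decide ((PySem.Int.bitLength v : Int) = a))) : Int)
        + pvCnt block (a + 1) := by
  unfold pvCnt
  induction block with
  | nil => simp
  | cons v t ih =>
    simp only [List.countP_cons, Bool.and_eq_true, decide_eq_true_eq]
    push_cast
    split_ifs <;> omega

-- exception count A computes at b equals pvCnt block (b+1) for 0 ≤ b < W
theorem pvEA_eq (block : List Int) (b : Int) (hb : 0 ≤ b) :
    ((block.filter (fun v => (2:Int) ^ b.toNat - 1 < v)).length : Int) = pvCnt block (b + 1) := by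
  unfold pvCnt
  rw [← List.countP_eq_length_filter]
  have h := List.countP_congr (l := block)
    (p := fun v => decide ((2:Int) ^ b.toNat - 1 < v))
    (q := fun v => decide (0 < v) && decide (b + 1 ≤ (PySem.Int.bitLength v : Int)))
    (fun v _ => by
      have h0 := pvThreshold_iff b.toNat v
      rw [Int.toNat_of_nonneg hb] at h0
      simp only [decide_eq_true_eq, Bool.and_eq_true]
      constructor
      · intro h1
        have h2 := h0.mp h1
        exact ⟨h2.1, by omega⟩
      · rintro ⟨h1, h2⟩
        exact h0.mpr ⟨h1, by omega⟩)
  rw [h]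

-- exception count A computes at b = W (threshold 0xFFFFFFFF = 2^32 - 1)
theorem pvEW_eq (block : List Int) :
    ((block.filter (fun v => (4294967295 : Int) < v)).length : Int) =
      ((block.countP (fun v => decide (0 < v) && decide (32 < (PySem.Int.bitLength v : Int)))) : Int) := by
  rw [← List.countP_eq_length_filter]
  have h := List.countP_congr (l := block)
    (p := fun v => decide ((4294967295:Int) < v))
    (q := fun v => decide (0 < v) && decide (32 < (PySem.Int.bitLength v : Int)))
    (fun v _ => by
      have h0 := pvThreshold_iff 32 v
      norm_num at h0
      simp only [decide_eq_true_eq, Bool.and_eq_true]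
      constructor
      · intro h1
        have h2 := h0.mp h1
        exact ⟨h2.1, by omega⟩
      · rintro ⟨h1, h2⟩
        exact h0.mpr ⟨h1, by omega⟩)
  rw [h]

-- the two b-loops agree (invariant: third component of B's state is pvCnt block a)
theorem pvLoop_agree (block : List Int) (W : Int) (hist : PySem.Dict Int Int) (cnt32 : Int)
    (hhist : ∀ b, hist.getD b 0 =
      ((block.countP (fun v => decide (0 < v) && decide ((PySem.Int.bitLength v : Int) = b))) : Int))
    (hcnt32 : cnt32 = ((block.countP (fun v => decide (0 < v) && decide (32 < (PySem.Int.bitLength v : Int)))) : Int)) :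
    ∀ (k : Nat) (a : Int) (st : Int × Option Int), 0 ≤ a → a + k = W + 1 →
    ((PySem.List.pyRange a (W + 1) 1).foldl (pvStepA block W) st).1 =
      ((PySem.List.pyRange a (W + 1) 1).foldl (pvStepB2 (block.length : Int) W hist cnt32)
        (st.1, st.2, pvCnt block a)).1 := by
  intro k
  induction k with
  | zero =>
    intro a st _ hk
    rw [PySem.List.pyRange_one_eq_nil (by omega)]
    simp
  | succ k ih =>
    intro a st ha hk
    rw [PySem.List.pyRange_one_cons (by omega)]
    simp only [List.foldl_cons]
    by_cases haW : a < W
    · -- step at b = a, then induction at a + 1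
      have he : pvCnt block a - hist.getD a 0 = pvCnt block (a + 1) := by
        rw [hhist a, pvCnt_split block a]; ring
      have heA : ((block.filter (fun v => (2:Int) ^ a.toNat - 1 < v)).length : Int) =
          pvCnt block (a + 1) := pvEA_eq block a ha
      have hstep : pvStepB2 (block.length : Int) W hist cnt32 (st.1, st.2, pvCnt block a) a =
          ((pvStepA block W st a).1, (pvStepA block W st a).2, pvCnt block (a + 1)) := by
        cases hst : st.2 with
        | none => simp only [pvStepA, pvStepB2, if_pos haW, hst, he, heA]
        | some bc =>
          simp only [pvStepA, pvStepB2, if_pos haW, hst, he, heA]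
          split <;> simp [hst]
      rw [hstep]
      have h6 := ih (a + 1) (pvStepA block W st a) (by omega) (by omega)
      simpa using h6
    · -- a = W: last iteration, remaining range is empty
      have hnil : PySem.List.pyRange (a + 1) (W + 1) 1 = [] :=
        PySem.List.pyRange_one_eq_nil (by omega)
      rw [hnil]
      simp only [List.foldl_nil]
      have heW : ((block.filter (fun v => (0xFFFFFFFF : Int) < v)).length : Int) = cnt32 := by
        rw [hcnt32]; exact pvEW_eq block
      cases hst : st.2 with
      | none => simp only [pvStepA, pvStepB2, if_neg haW, hst, heW]
      | some bc =>
        simp only [pvStepA, pvStepB2, if_neg haW, hst, heW]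
        split <;> simp

theorem find_optimal_b_py_agree (block : List Int) (W : Int) :
    find_optimal_b_py block W = find_optimal_b_py_alt block W := by
  by_cases hW : W + 1 ≤ 0
  · unfold find_optimal_b_py find_optimal_b_py_alt
    rw [PySem.List.pyRange_one_eq_nil (by omega)]
    simp
  · have e0 : pvCnt block 0 = 0 + ((block.countP (fun v => decide (0 < v))) : Int) := by
      unfold pvCnt
      have h := List.countP_congr (l := block)
        (p := fun v => decide (0 < v) && decide ((0:Int) ≤ (PySem.Int.bitLength v : Int)))
        (q := fun v => decide (0 < v))
        (fun v _ => by
          simp only [Bool.and_eq_true, decide_eq_true_eq]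
          constructor
          · exact fun h => h.1
          · exact fun h => ⟨h, Int.natCast_nonneg _⟩)
      rw [h]; ring
    have hh : ∀ b, (((block.filter (fun v => decide (0 < v))).map
          (fun v => (PySem.Int.bitLength v : Int))).foldl
            (fun d x => d.insert x (d.getD x 0 + 1)) PySem.Dict.empty).getD b 0 =
        ((block.countP (fun v => decide (0 < v) && decide ((PySem.Int.bitLength v : Int) = b))) : Int) := by
      intro b
      have h := pvHist_getD block b
      rw [pvStepB1_foldl] at h
      exact h
    have hmain := pvLoop_agree block W _ _ hh rfl (W + 1).toNat 0 (0, none) le_rfl (by omega)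
    rw [e0] at hmain
    unfold find_optimal_b_py find_optimal_b_py_alt
    rw [pvStepB1_foldl]
    simpa using hmain

-- ===== VERDICT (by name: the statement is the Claim_ definition above) =====
theorem find_optimal_b_py_spec : Claim_equal_find_optimal_b_py := by
  intro block W _
  exact find_optimal_b_py_agree block W
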